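-- pv_equiv track=rewrite | github.com/xiaojing-503/SQLHospital | utils/get_sql_schema_prompt.py | format_database_schema
-- ===== SOURCE A (Python) =====
-- def format_database_schema(data_dict):
--     tables = {}
--
--     for key in data_dict.keys():
--         table, column = key.split(':')
--         if table not in tables:
--             tables[table] = []
--         if column not in tables[table]:
--             tables[table].append(column)
--
--     result_lines = []
--
--     for table, columns in tables.items():
--         formatted_columns = []
--
--         for column in columns:
--             full_column_name = f"{table}:{column}"
--             values = data_dict[full_column_name]
--
--             if values:
--                 formatted_values = []
--                 for value in values:
--                     if value.startswith('(') and value.endswith(')'):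
--                         formatted_values.append(f"{value[1:-1]}")
--                     else:
--                         formatted_values.append(value)
--
--
--                 formatted_values_str = ', '.join(formatted_values)
--
--
--                 formatted_column = f"`{column}` (values: '{formatted_values_str}')"
--             else:
--                 formatted_column = f"`{column}`"
--
--             formatted_columns.append(formatted_column)
--
--         result_lines.append(f"table {table.lower()}, columns = [{', '.join(formatted_columns)}]")
--
--     return '; '.join(result_lines)
-- ===== SOURCE B (Python) =====
-- def format_database_schema(data_dict):
--     # One flat pass: format each column inline and group the formatted strings by table.
--     groups = {}
--     for key, values in data_dict.items():
--         table, column = key.split(':')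
--         if values:
--             vals = ', '.join(v[1:-1] if v.startswith('(') and v.endswith(')') else v
--                              for v in values)
--             col = f"`{column}` (values: '{vals}')"
--         else:
--             col = f"`{column}`"
--         groups.setdefault(table, []).append(col)
--     return '; '.join(f"table {table.lower()}, columns = [{', '.join(cols)}]"
--                      for table, cols in groups.items())
-- ===== Notes on version B (the rewrite author's own statement) =====
-- stated objective: simpler
-- what changed: A builds an intermediate per-table index of column NAMES and then a second pass reconstructs each 'table:column' key and looks it up in the dict again before formatting; B is one flat pass over the items that formats each column inline and groups the already-formatted strings by table with setdefault, so the name index, the key reconstruction and the second lookup disappear.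
import Mathlib
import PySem

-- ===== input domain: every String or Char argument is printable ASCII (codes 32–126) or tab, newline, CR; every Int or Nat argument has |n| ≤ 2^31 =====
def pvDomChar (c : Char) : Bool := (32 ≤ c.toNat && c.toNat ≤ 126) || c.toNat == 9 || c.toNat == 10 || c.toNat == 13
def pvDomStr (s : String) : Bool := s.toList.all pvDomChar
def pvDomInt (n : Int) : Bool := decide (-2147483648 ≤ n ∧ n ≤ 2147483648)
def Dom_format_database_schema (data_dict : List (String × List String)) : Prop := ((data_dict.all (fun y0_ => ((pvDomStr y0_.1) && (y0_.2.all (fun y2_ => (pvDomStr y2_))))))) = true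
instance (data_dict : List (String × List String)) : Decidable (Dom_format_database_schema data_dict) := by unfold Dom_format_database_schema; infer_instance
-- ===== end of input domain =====

-- B replaces A's two-phase scheme (index of column NAMES per table, then a second formatting
-- pass that reconstructs each "table:column" key and looks it up again) by ONE flat pass that
-- formats each column inline and groups the already-formatted strings by table (objective: simpler).

-- ===== PORT A =====
-- `table, column = key.split(':')`: none = ValueError (≠ 2 parts), excluded by Pre_.
def pvSplitKey (k : String) : Option (String × String) :=
  match PySem.Str.split? k ":" with
  | some [t, c] => some (t, c)
  | _ => none

-- body of A's first loop (building `tables`, the per-table column-name index)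
def pvTablesStep (tables : PySem.Dict String (List String)) (key : String) :
    PySem.Dict String (List String) :=
  match pvSplitKey key with
  | none => tables
  | some (table, column) =>
    let tables := if tables.contains table then tables else tables.insert table []
    if (tables.getD table []).contains column then tables
    else tables.insert table (tables.getD table [] ++ [column])

-- body of A's second loop for one column: rebuild `f"{table}:{column}"` (= ':'.join of the two
-- parts), look it up in data_dict (KeyError impossible: the key came from the dict, `.getD []`
-- is never exercised under Pre_), and format.
def pvColA (d : PySem.Dict String (List String)) (table column : String) : String :=
  let values := (d.get? (PySem.Str.join ":" [table, column])).getD []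
  if !values.isEmpty then
    PySem.Str.join "" ["`", column, "` (values: '",
      PySem.Str.join ", " (values.foldl (fun acc v =>
        acc ++ [if PySem.Str.startswith v "(" && PySem.Str.endswith v ")"
                then PySem.Str.slice v (some 1) (some (-1)) else v]) []), "')"]
  else PySem.Str.join "" ["`", column, "`"]

def format_database_schema (data_dict : List (String × List String)) : String :=
  let d := PySem.Dict.mk data_dict
  let tables := d.keys.foldl pvTablesStep PySem.Dict.empty
  let result_lines := tables.items.foldl (fun lines tc =>
    lines ++ [PySem.Str.join "" ["table ", PySem.Str.lower tc.1, ", columns = [",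
      PySem.Str.join ", " (tc.2.foldl (fun fcs column => fcs ++ [pvColA d tc.1 column]) []),
      "]"]]) []
  PySem.Str.join "; " result_lines

-- ===== PORT B =====
-- one formatted column string, straight from the values at hand
def pvColB (column : String) (values : List String) : String :=
  if !values.isEmpty then
    PySem.Str.join "" ["`", column, "` (values: '",
      PySem.Str.join ", " (values.map (fun v =>
        if PySem.Str.startswith v "(" && PySem.Str.endswith v ")"
        then PySem.Str.slice v (some 1) (some (-1)) else v)), "')"]
  else PySem.Str.join "" ["`", column, "`"]

def format_database_schema_alt (data_dict : List (String × List String)) : String :=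
  let groups := data_dict.foldl (fun g kv =>
    match pvSplitKey kv.1 with
    | none => g
    | some (table, column) => g.modify table [] (· ++ [pvColB column kv.2]))
    PySem.Dict.empty
  PySem.Str.join "; " (groups.items.map (fun tc =>
    PySem.Str.join "" ["table ", PySem.Str.lower tc.1, ", columns = [",
      PySem.Str.join ", " tc.2, "]"]))

-- ===== PRECONDITION & SPEC =====
-- Pre_ excludes (a) keys that do not contain exactly one ':' — there `key.split(':')` makes A
-- raise ValueError — and (b) duplicate keys, which cannot occur in the Python dict A receives:
-- the association list is only a faithful picture of a dict when its keys are distinct.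
def Pre_format_database_schema (data_dict : List (String × List String)) : Prop :=
  (data_dict.map Prod.fst).Nodup ∧ ∀ kv ∈ data_dict, kv.1.toList.count ':' = 1
instance (data_dict : List (String × List String)) : Decidable (Pre_format_database_schema data_dict) := by unfold Pre_format_database_schema; infer_instance

def pvWitness_format_database_schema : (List (String × List String)) :=
  [("t1:a", ["(x)"]), ("t1:b", []), ("T2:a", ["y", "z"])]

def Spec_format_database_schema (data_dict : List (String × List String)) (out : String) : Prop := out = format_database_schema_alt data_dict
instance (data_dict : List (String × List String)) (out : String) : Decidable (Spec_format_database_schema data_dict out) := by unfold Spec_format_database_schema; infer_instance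

-- ===== CLAIM (what is proved, stated in full; the proofs are below) =====
def Claim_equal_format_database_schema : Prop := ∀ (data_dict : List (String × List String)), Dom_format_database_schema data_dict → Pre_format_database_schema data_dict → Spec_format_database_schema data_dict (format_database_schema data_dict)

-- ===== LEMMAS AND PROOFS =====

theorem pv_go_no_sep (fuel : Nat) : ∀ (l cur : List Char) (acc : List (List Char)), ':' ∉ l →
    PySem.Chars.splitOn.go [':'] fuel l cur acc = ((cur.reverse ++ l) :: acc).reverse := by
  induction fuel with
  | zero => intro l cur acc h; rw [PySem.Chars.splitOn.go]
  | succ n ih =>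
    intro l cur acc h
    cases l with
    | nil => rw [PySem.Chars.splitOn.go] <;> simp
    | cons c rest =>
      rw [PySem.Chars.splitOn.go]
      have hc : c ≠ ':' := fun hc => h (hc ▸ List.mem_cons_self)
      have hp : [':'].isPrefixOf (c :: rest) = false := by
        simp [List.isPrefixOf]; exact fun h => absurd h.symm hc
      rw [hp]
      simp only [Bool.false_eq_true, if_false]
      rw [ih rest (c :: cur) acc (fun hm => h (List.mem_cons_of_mem _ hm))]
      simp

theorem pv_go_skip (t : List Char) : ∀ (fuel : Nat) (l cur : List Char) (acc : List (List Char)), ':' ∉ t →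
    PySem.Chars.splitOn.go [':'] (fuel + t.length) (t ++ l) cur acc
      = PySem.Chars.splitOn.go [':'] fuel l (t.reverse ++ cur) acc := by
  induction t with
  | nil => intro fuel l cur acc _; simp
  | cons c t' ih =>
    intro fuel l cur acc h
    have hc : c ≠ ':' := fun hc => h (hc ▸ List.mem_cons_self)
    have hst : fuel + (c :: t').length = (fuel + t'.length) + 1 := by simp; omega
    rw [hst, List.cons_append]
    rw [PySem.Chars.splitOn.go]
    have hp : [':'].isPrefixOf (c :: (t' ++ l)) = false := by
      simp [List.isPrefixOf]; exact fun h => absurd h.symm hc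
    rw [hp]
    simp only [Bool.false_eq_true, if_false]
    rw [ih fuel l (c :: cur) acc (fun hm => h (List.mem_cons_of_mem _ hm))]
    simp

theorem pv_splitOn_shape (T C : List Char) (hT : ':' ∉ T) (hC : ':' ∉ C) :
    PySem.Chars.splitOn (T ++ ':' :: C) [':'] = [T, C] := by
  unfold PySem.Chars.splitOn
  have hlen : (T ++ ':' :: C).length + 1 = (C.length + 2) + T.length := by simp; omega
  rw [hlen, pv_go_skip T (C.length + 2) (':' :: C) [] [] hT]
  have : C.length + 2 = (C.length + 1) + 1 := rfl
  rw [this, PySem.Chars.splitOn.go]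
  have hp : [':'].isPrefixOf (':' :: C) = true := by simp [List.isPrefixOf]
  rw [hp]
  simp only [if_true]
  rw [pv_go_no_sep (C.length + 1) (List.drop [':'].length (':' :: C)) [] _ (by simpa using hC)]
  simp

theorem pv_count_one_shape : ∀ (l : List Char), l.count ':' = 1 →
    ∃ T C, l = T ++ ':' :: C ∧ ':' ∉ T ∧ ':' ∉ C := by
  intro l
  induction l with
  | nil => simp
  | cons c rest ih =>
    intro h
    by_cases hc : c = ':'
    · subst hc
      have : rest.count ':' = 0 := by simpa [List.count_cons] using h
      exact ⟨[], rest, by simp, by simp, by simpa [List.count_eq_zero] using this⟩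
    · have : rest.count ':' = 1 := by simpa [List.count_cons, hc] using h
      obtain ⟨T, C, rfl, hT, hC⟩ := ih this
      exact ⟨c :: T, C, by simp, by simp [hT]; exact fun h => hc h.symm, hC⟩

theorem pv_split_eq (k : String) (T C : List Char) (hk : k.toList = T ++ ':' :: C)
    (hT : ':' ∉ T) (hC : ':' ∉ C) :
    pvSplitKey k = some (String.ofList T, String.ofList C) := by
  have hs : PySem.Str.split? k ":" = some [String.ofList T, String.ofList C] := by
    simp [PySem.Str.split?, PySem.Chars.split?, hk, pv_splitOn_shape T C hT hC]
  unfold pvSplitKey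
  rw [hs]

theorem pv_join_key (k : String) (T C : List Char) (hk : k.toList = T ++ ':' :: C) :
    PySem.Str.join ":" [String.ofList T, String.ofList C] = k := by
  have : (PySem.Str.join ":" [String.ofList T, String.ofList C]).toList = k.toList := by
    simp [PySem.Str.join, PySem.Chars.join, hk, List.intercalate]
  exact String.toList_inj.mp this

theorem pv_colA_eq (D : PySem.Dict String (List String)) (t c : String) (vs : List String)
    (h : D.get? (PySem.Str.join ":" [t, c]) = some vs) :
    pvColA D t c = pvColB c vs := by
  unfold pvColA pvColB
  rw [h]
  simp only [Option.getD_some]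
  rw [PySem.List.foldl_append_singleton_eq_map]
  simp

theorem pv_rel_get? (D : PySem.Dict String (List String))
    (A B : PySem.Dict String (List String))
    (h : B.items = A.items.map (fun tc => (tc.1, tc.2.map (pvColA D tc.1)))) (t : String) :
    B.get? t = (A.get? t).map (fun cols => cols.map (pvColA D t)) := by
  have hcomp : ((fun p : String × List String => p.1 == t) ∘
      (fun tc : String × List String => (tc.1, tc.2.map (pvColA D tc.1)))) =
      (fun p : String × List String => p.1 == t) := by funext p; rfl
  cases hf : A.items.find? (fun p => p.1 == t) with
  | none => simp [PySem.Dict.get?, h, List.find?_map, hcomp, hf]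
  | some q =>
    have hq' : q.1 = t := by simpa using (List.find?_eq_some_iff_append.mp hf).1
    simp [PySem.Dict.get?, h, List.find?_map, hcomp, hf, hq']

theorem pv_rel_contains (D : PySem.Dict String (List String))
    (A B : PySem.Dict String (List String))
    (h : B.items = A.items.map (fun tc => (tc.1, tc.2.map (pvColA D tc.1)))) (t : String) :
    B.contains t = A.contains t := by
  simp [PySem.Dict.contains, h, List.any_map]
  rfl


theorem pv_main (D : PySem.Dict String (List String)) :
    ∀ (p : List (String × List String)),
    (∀ kv ∈ p, D.get? kv.1 = some kv.2) →
    (p.map Prod.fst).Nodup →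
    (∀ kv ∈ p, kv.1.toList.count ':' = 1) →
    (p.foldl (fun g kv =>
        match pvSplitKey kv.1 with
        | none => g
        | some (table, column) => g.modify table [] (· ++ [pvColB column kv.2]))
        PySem.Dict.empty).items
      = ((p.map Prod.fst).foldl pvTablesStep PySem.Dict.empty).items.map
          (fun tc => (tc.1, tc.2.map (pvColA D tc.1)))
    ∧ ((p.map Prod.fst).foldl pvTablesStep PySem.Dict.empty).keys.Nodup
    ∧ (∀ tc ∈ ((p.map Prod.fst).foldl pvTablesStep PySem.Dict.empty).items,
        ∀ c ∈ tc.2, ∃ v, (PySem.Str.join ":" [tc.1, c], v) ∈ p) := by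
  intro p
  induction p using List.reverseRecOn with
  | nil =>
    intro _ _ _
    refine ⟨rfl, by simp [PySem.Dict.empty, PySem.Dict.keys], by simp [PySem.Dict.empty]⟩
  | append_singleton p kv ihp =>
    intro hsub hnd hshape
    have hsub' : ∀ x ∈ p, D.get? x.1 = some x.2 :=
      fun x hx => hsub x (List.mem_append_left _ hx)
    have hnd' : (p.map Prod.fst).Nodup := by
      rw [List.map_append] at hnd; exact hnd.sublist (List.sublist_append_left _ _)
    have hshape' : ∀ x ∈ p, x.1.toList.count ':' = 1 :=
      fun x hx => hshape x (List.mem_append_left _ hx)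
    obtain ⟨ihrel, ihnd, ihmem⟩ := ihp hsub' hnd' hshape'
    -- the new key has shape T ++ ':' :: C
    obtain ⟨T, C, hk, hT, hC⟩ := pv_count_one_shape kv.1.toList
      (hshape kv (List.mem_append_right _ List.mem_cons_self))
    set tS := String.ofList T with htS
    set cS := String.ofList C with hcS
    have hsplit : pvSplitKey kv.1 = some (tS, cS) := pv_split_eq kv.1 T C hk hT hC
    have hjoin : PySem.Str.join ":" [tS, cS] = kv.1 := pv_join_key kv.1 T C hk
    have hlook : D.get? kv.1 = some kv.2 :=
      hsub kv (List.mem_append_right _ List.mem_cons_self)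
    have hcol : pvColA D tS cS = pvColB cS kv.2 :=
      pv_colA_eq D tS cS kv.2 (by rw [hjoin]; exact hlook)
    have hfresh : kv.1 ∉ p.map Prod.fst := by
      rw [List.map_append] at hnd
      have h2 : ∀ a x, (a, x) ∈ p → ¬ a = kv.1 := by
        simpa using (List.nodup_append.mp hnd).2.2
      intro hm
      obtain ⟨x, hx, hfst⟩ := List.mem_map.mp hm
      exact h2 x.1 x.2 hx hfst
    -- abbreviations for the two folded dicts over the prefix
    set A' := (p.map Prod.fst).foldl pvTablesStep PySem.Dict.empty with hA'
    set B' := p.foldl (fun g kv =>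
        match pvSplitKey kv.1 with
        | none => g
        | some (table, column) => g.modify table [] (· ++ [pvColB column kv.2]))
        PySem.Dict.empty with hB'
    have hstepA : ((p ++ [kv]).map Prod.fst).foldl pvTablesStep PySem.Dict.empty
        = pvTablesStep A' kv.1 := by
      rw [List.map_append, List.foldl_append]; rfl
    have hstepB : (p ++ [kv]).foldl (fun g kv =>
        match pvSplitKey kv.1 with
        | none => g
        | some (table, column) => g.modify table [] (· ++ [pvColB column kv.2]))
        PySem.Dict.empty = B'.modify tS [] (· ++ [pvColB cS kv.2]) := by
      rw [List.foldl_append]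
      rw [← hB']
      simp [hsplit]
    have hnotin : ∀ cols, A'.get? tS = some cols → cS ∉ cols := by
      intro cols hg hcmem
      obtain ⟨v, hv⟩ := ihmem (tS, cols) (PySem.Dict.mem_items_of_get?_eq_some A' hg) cS hcmem
      exact hfresh (by rw [← hjoin]; exact List.mem_map.mpr ⟨_, hv, rfl⟩)
    rw [hstepA, hstepB]
    by_cases hct : A'.contains tS = true
    · -- table already present: A keeps position, appends the column
      obtain ⟨cols, hg⟩ : ∃ cols, A'.get? tS = some cols := by
        have := PySem.Dict.contains_eq_isSome_get? (d := A') (k := tS)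
        rw [hct] at this
        exact Option.isSome_iff_exists.mp this.symm
      have hgD : A'.getD tS [] = cols := by simp [PySem.Dict.getD, hg]
      have hnc : cols.contains cS = false := by
        simpa using hnotin cols hg
      have hAstep : pvTablesStep A' kv.1 = A'.insert tS (cols ++ [cS]) := by
        unfold pvTablesStep
        rw [hsplit]
        simp only [hct, if_true, hgD, hnc, Bool.false_eq_true, if_false]
      have hctB : B'.contains tS = true := by
        rw [pv_rel_contains D A' B' ihrel]; exact hct
      have hgB : B'.get? tS = some (cols.map (pvColA D tS)) := by
        rw [pv_rel_get? D A' B' ihrel, hg]; rfl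
      have hgDB : B'.getD tS [] = cols.map (pvColA D tS) := by
        simp [PySem.Dict.getD, hgB]
      have hBstep : (B'.modify tS [] (· ++ [pvColB cS kv.2]))
          = B'.insert tS (cols.map (pvColA D tS) ++ [pvColB cS kv.2]) := by
        simp [PySem.Dict.modify, hgDB]
      refine ⟨?_, ?_, ?_⟩
      · rw [hAstep, hBstep, PySem.Dict.items_insert_of_contains _ _ hctB,
          PySem.Dict.items_insert_of_contains _ _ hct, ihrel, List.map_map, List.map_map]
        apply List.map_congr_left
        intro x hx
        by_cases hxk : x.1 = tS
        · simp [Function.comp, hxk, hcol]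
        · simp [Function.comp, hxk]
      · rw [hAstep, PySem.Dict.keys_insert_of_contains _ _ hct]; exact ihnd
      · intro tc htc c hc
        rw [hAstep, PySem.Dict.items_insert_of_contains _ _ hct] at htc
        obtain ⟨x, hx, hrepl⟩ := List.mem_map.mp htc
        by_cases hxk : x.1 = tS
        · rw [if_pos (by simpa using hxk)] at hrepl
          rw [← hrepl] at hc ⊢
          rcases List.mem_append.mp hc with hcc | hcc
          · obtain ⟨v, hv⟩ := ihmem (tS, cols) (PySem.Dict.mem_items_of_get?_eq_some A' hg) c hcc
            exact ⟨v, List.mem_append_left _ hv⟩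
          · have : c = cS := by simpa using hcc
            subst this
            exact ⟨kv.2, by rw [hjoin]; exact List.mem_append_right _ List.mem_cons_self⟩
        · rw [if_neg (by simpa using hxk)] at hrepl
          rw [← hrepl] at hc ⊢
          obtain ⟨v, hv⟩ := ihmem x hx c hc
          exact ⟨v, List.mem_append_left _ hv⟩
    · -- fresh table: both dicts append a new entry
      have hctF : A'.contains tS = false := by simpa using hct
      have hctB : B'.contains tS = false := by
        rw [pv_rel_contains D A' B' ihrel]; exact hctF
      have hnk : ∀ x ∈ A'.items, (x.1 == tS) = false := by
        intro x hx
        have hany := hctF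
        unfold PySem.Dict.contains at hany
        simpa using List.any_eq_false.mp hany x hx
      have e1 : pvTablesStep A' kv.1 = (A'.insert tS []).insert tS ([] ++ [cS]) := by
        unfold pvTablesStep
        rw [hsplit]
        simp only [hctF, Bool.false_eq_true, if_false]
        rw [PySem.Dict.getD_insert_self]
        simp
      have hAitems : (pvTablesStep A' kv.1).items = A'.items ++ [(tS, [cS])] := by
        rw [e1, PySem.Dict.items_insert_of_contains _ _ (PySem.Dict.contains_insert_self A' tS []),
          PySem.Dict.items_insert_of_not_contains _ _ hctF, List.map_append]
        rw [List.map_congr_left (fun x hx => by rw [if_neg (by simp [hnk x hx])])]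
        simp
      have hAkeys : (pvTablesStep A' kv.1).keys = A'.keys ++ [tS] := by
        rw [e1, PySem.Dict.keys_insert_of_contains _ _ (PySem.Dict.contains_insert_self A' tS []),
          PySem.Dict.keys_insert_of_not_contains _ _ hctF]
      have hBitems : (B'.modify tS [] (· ++ [pvColB cS kv.2])).items
          = B'.items ++ [(tS, [pvColB cS kv.2])] := by
        rw [PySem.Dict.modify, PySem.Dict.getD_of_not_contains _ _ hctB,
          PySem.Dict.items_insert_of_not_contains _ _ hctB]
        simp
      refine ⟨?_, ?_, ?_⟩
      · rw [hBitems, hAitems, ihrel, List.map_append]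
        simp [hcol]
      · rw [hAkeys]
        have htmem : tS ∉ A'.keys := by
          intro hm
          rw [← PySem.Dict.contains_iff_mem_keys] at hm
          rw [hctF] at hm
          exact Bool.false_ne_true hm
        simp only [List.nodup_append, List.nodup_cons]
        refine ⟨ihnd, by simp, ?_⟩
        intro a ha b hb
        rw [List.mem_singleton] at hb
        subst hb
        exact fun hab => htmem (hab ▸ ha)
      · intro tc htc c hc
        rw [hAitems] at htc
        rcases List.mem_append.mp htc with hx | hx
        · obtain ⟨v, hv⟩ := ihmem tc hx c hc
          exact ⟨v, List.mem_append_left _ hv⟩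
        · have : tc = (tS, [cS]) := by simpa using hx
          subst this
          have : c = cS := by simpa using hc
          subst this
          exact ⟨kv.2, by rw [hjoin]; exact List.mem_append_right _ List.mem_cons_self⟩

-- ===== VERDICT (by name: the statement is the Claim_ definition above) =====
theorem format_database_schema_spec : Claim_equal_format_database_schema := by
  intro data_dict _ hpre
  obtain ⟨hnd, hshape⟩ := hpre
  unfold Spec_format_database_schema
  unfold format_database_schema format_database_schema_alt
  dsimp only []
  have hkeys : (PySem.Dict.mk data_dict).keys = data_dict.map Prod.fst := rfl
  have hknd : (PySem.Dict.mk data_dict).keys.Nodup := by rw [hkeys]; exact hnd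
  have hsub : ∀ kv ∈ data_dict, (PySem.Dict.mk data_dict).get? kv.1 = some kv.2 := by
    intro kv hkv
    exact PySem.Dict.get?_of_mem_items _ (by exact hkv) hknd
  have hrel := (pv_main (PySem.Dict.mk data_dict) data_dict hsub hnd hshape).1
  rw [hkeys] at *
  congr 1
  rw [hrel, PySem.List.foldl_append_singleton_eq_map, List.map_map]
  apply List.map_congr_left
  intro tc _
  rw [PySem.List.foldl_append_singleton_eq_map]
  rfl
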